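-- pv_equiv track=rewrite | github.com/miliar/Code_Jam_Webscraper | Solutions_python/Problem_156/723.py | time
-- ===== SOURCE A (Python) =====
-- memo = {}
--
-- def time(ps):
--
--     ps = tuple(reversed(sorted(ps)))
--
--     if ps in memo:
--         return memo[ps]
--     if ps[0] == 1:
--         return 1
--
--     # split the biggest stacks
--     result = ps[0]
--
--     for k in range(1, ps[0] - 1):
--         if k > (ps[0] - k):
--             break
--
--         special_ps = []
--         special = 0
--         for i, p in enumerate(ps):
--             if p != ps[0]:
--                 special_ps.extend(ps[i:])
--                 break
--             special_ps.extend((ps[0] - k, k))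
--             special += 1
--
--         result = min(special + time(special_ps), result)
--
--     memo[ps] = result
--     return result
-- ===== SOURCE B (Python) =====
-- def time(ps):
--     # For a chosen final maximum height d, the optimal play is: spend
--     # ceil(p/d)-1 split-minutes on each pile p, then wait d minutes.
--     # Minimise d + sum(ceil(p/d)-1) over d = 1 .. max(ps).
--     m = max(ps)
--     if m <= 0:
--         return m
--     best = m  # d = m: no splits, wait m minutes
--     for d in range(1, m):
--         cost = d
--         for p in ps:
--             if p > 0:
--                 cost += (p + d - 1) // d - 1
--         best = min(best, cost)
--     return best
-- ===== Notes on version B (the rewrite author's own statement) =====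
-- stated objective: alternative
-- what changed: Replaces A's memoized branching recursion over all ways of repeatedly splitting the biggest piles by a direct minimum of d + sum(ceil(p/d)-1) over the candidate final maximum height d.
import Mathlib
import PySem

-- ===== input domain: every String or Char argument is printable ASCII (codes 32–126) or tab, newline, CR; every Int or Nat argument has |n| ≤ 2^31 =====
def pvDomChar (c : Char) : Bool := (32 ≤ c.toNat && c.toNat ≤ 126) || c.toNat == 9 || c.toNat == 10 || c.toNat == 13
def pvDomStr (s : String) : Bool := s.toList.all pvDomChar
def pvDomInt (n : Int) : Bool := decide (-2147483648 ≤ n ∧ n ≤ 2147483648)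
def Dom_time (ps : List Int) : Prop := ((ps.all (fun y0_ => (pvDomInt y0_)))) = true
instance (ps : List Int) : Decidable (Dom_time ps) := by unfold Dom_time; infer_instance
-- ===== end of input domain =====

-- B replaces A's branching recursion over splits by a direct minimum of
-- d + sum(ceil(p/d)-1) over the candidate final maximum height d (a different, direct algorithm).

-- ===== PORT A =====
-- inner 'for i, p in enumerate(ps)' loop: returns (special_ps, special)
def timeBuild (M k : Int) : List Int → List Int × Int
  | [] => ([], 0)
  | p :: rest =>
    if p ≠ M then (p :: rest, 0)
    else
      let r := timeBuild M k rest
      ((M - k) :: k :: r.1, r.2 + 1)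

-- A's recursion, with a fuel counter that only guards termination (the global memo in
-- the Python is a pure cache and does not change the returned value).
mutual
def timeF : Nat → List Int → Int
  | 0, _ => 0
  | Nat.succ n, ps => timeStep n ((PySem.List.sorted ps (fun x => x) false).reverse)
termination_by n _ => (n, 0, 0)

def timeStep (n : Nat) (s : List Int) : Int :=
  match s with
  | [] => 0          -- Python raises IndexError on the empty list; excluded by Pre_time
  | h :: t =>
    if h = 1 then 1
    else timeLoopF n (h :: t) h (PySem.List.pyRange 1 (h - 1) 1) h
termination_by (n, 1, 0)

-- 'for k in range(1, ps[0]-1)' with the break 'k > ps[0]-k'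
def timeLoopF (n : Nat) (s : List Int) (M : Int) : List Int → Int → Int
  | [], result => result
  | k :: ks, result =>
    if k > M - k then result
    else timeLoopF n s M ks (min ((timeBuild M k s).2 + timeF n (timeBuild M k s).1) result)
termination_by ks _ => (n, 0, ks.length + 1)
end

def fuelTime (ps : List Int) : Nat := (ps.foldl max 0).toNat + 1

def time (ps : List Int) : Int := timeF (fuelTime ps) ps

-- ===== PORT B =====
-- cost of finishing with every pile cut down to height ≤ d: Source B's inner 'for p in ps' loop
def costB (ps : List Int) (d : Int) : Int :=
  ps.foldl (fun cost p => if 0 < p then cost + (PySem.Int.floordiv (p + d - 1) d - 1) else cost) d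

def time_alt (ps : List Int) : Int :=
  match PySem.List.max? ps (fun x => x) with
  | none => 0        -- Python max([]) raises ValueError; excluded by Pre_time
  | some m =>
    if m ≤ 0 then m
    else (PySem.List.pyRange 1 m 1).foldl (fun best d => min best (costB ps d)) m

-- ===== PRECONDITION & SPEC =====
-- Pre_ excludes only the empty list, on which both Pythons raise (A: IndexError on ps[0];
-- B: ValueError from max([])).
def Pre_time (ps : List Int) : Prop := ps ≠ []
instance (ps : List Int) : Decidable (Pre_time ps) := by unfold Pre_time; infer_instance

def pvWitness_time : List Int := [3, 1]

def Spec_time (ps : List Int) (out : Int) : Prop := out = time_alt ps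
instance (ps : List Int) (out : Int) : Decidable (Spec_time ps out) := by unfold Spec_time; infer_instance

-- ===== CLAIM (what is proved, stated in full; the proofs are below) =====
def Claim_equal_time : Prop := ∀ (ps : List Int), Dom_time ps → Pre_time ps → Spec_time ps (time ps)

-- ===== LEMMAS AND PROOFS =====

-- ceil(p / d) for d > 0, written as Python's (p + d - 1) // d
def ct (d p : Int) : Int := PySem.Int.floordiv (p + d - 1) d

def term (d p : Int) : Int := if 0 < p then ct d p - 1 else 0

def S (d : Int) (xs : List Int) : Int := (xs.map (term d)).sum

lemma ct_bracket (d p : Int) (hd : 0 < d) : ct d p * d ≤ p + d - 1 ∧ p + d - 1 < (ct d p + 1) * d :=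
  (PySem.Int.floordiv_eq_iff_of_pos hd).mp rfl

lemma ct_one (d p : Int) (hd : 0 < d) (hp : 0 < p) (hpd : p ≤ d) : ct d p = 1 := by
  unfold ct
  rw [PySem.Int.floordiv_eq_iff_of_pos hd]
  constructor <;> nlinarith

lemma one_le_ct (d p : Int) (hd : 0 < d) (hp : 0 < p) : 1 ≤ ct d p := by
  unfold ct
  rw [PySem.Int.le_floordiv_iff_mul_le hd]
  omega

lemma ct_sub (d M : Int) (hd : 0 < d) : ct d (M - d) = ct d M - 1 := by
  have h := ct_bracket d M hd
  unfold ct at h ⊢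
  rw [PySem.Int.floordiv_eq_iff_of_pos hd]
  constructor <;> nlinarith [h.1, h.2]

lemma ct_two (d M : Int) (hd : 0 < d) (h1 : d < M) (h2 : M ≤ 2 * d) : ct d M = 2 := by
  unfold ct
  rw [PySem.Int.floordiv_eq_iff_of_pos hd]
  constructor <;> nlinarith

lemma ct_superadd (d M k : Int) (hd : 0 < d) (_hk : 0 < k) (_hkM : k < M) :
    ct d M ≤ ct d (M - k) + ct d k := by
  have h1 := ct_bracket d (M - k) hd
  have h2 := ct_bracket d k hd
  have h3 := ct_bracket d M hd
  nlinarith [h1.1, h1.2, h2.1, h2.2, h3.1, h3.2]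

lemma term_nonneg (d p : Int) (hd : 0 < d) : 0 ≤ term d p := by
  unfold term
  split_ifs with h
  · have := one_le_ct d p hd h; omega
  · omega

lemma S_nil (d : Int) : S d [] = 0 := rfl

lemma S_cons (d p : Int) (xs : List Int) : S d (p :: xs) = term d p + S d xs := by
  simp [S]

lemma S_ge_term (d x : Int) (xs : List Int) (hd : 0 < d) (hx : x ∈ xs) :
    term d x ≤ S d xs := by
  exact List.single_le_sum (fun y hy => by
    obtain ⟨p, _, rfl⟩ := List.mem_map.mp hy
    exact term_nonneg d p hd) _ (List.mem_map_of_mem hx)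

lemma S_perm (d : Int) {xs ys : List Int} (h : xs.Perm ys) : S d xs = S d ys :=
  (h.map (term d)).sum_eq

lemma S_top (m : Int) (xs : List Int) (hm : 0 < m) (hall : ∀ p ∈ xs, p ≤ m) :
    S m xs = 0 := by
  apply List.sum_eq_zero
  intro x hx
  obtain ⟨p, hp, rfl⟩ := List.mem_map.mp hx
  unfold term
  split_ifs with h
  · rw [ct_one m p hm h (hall p hp)]; ring
  · rfl

lemma costB_eq_aux (d : Int) (xs : List Int) : ∀ init : Int,
    xs.foldl (fun cost p => if 0 < p then cost + (PySem.Int.floordiv (p + d - 1) d - 1) else cost) init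
      = init + S d xs := by
  induction xs with
  | nil => intro init; simp [S_nil]
  | cons p rest ih =>
    intro init
    simp only [List.foldl_cons, S_cons, ih]
    unfold term ct
    split_ifs <;> ring

lemma costB_eq (xs : List Int) (d : Int) : costB xs d = d + S d xs := by
  unfold costB; exact costB_eq_aux d xs d

-- timeBuild facts
lemma timeBuild_snd_nonneg (M k : Int) (s : List Int) : 0 ≤ (timeBuild M k s).2 := by
  induction s with
  | nil => simp [timeBuild]
  | cons p rest ih =>
    by_cases hp : p ≠ M
    · simp [timeBuild, hp]
    · simp only [timeBuild, if_neg hp]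
      omega

lemma timeBuild_head (M k : Int) (t : List Int) :
    timeBuild M k (M :: t) = ((M - k) :: k :: (timeBuild M k t).1, (timeBuild M k t).2 + 1) := by
  simp [timeBuild]

lemma timeBuild_S (d M k : Int) (s : List Int) :
    S d (timeBuild M k s).1 = S d s + (timeBuild M k s).2 * (term d (M - k) + term d k - term d M) := by
  induction s with
  | nil => simp [timeBuild, S_nil]
  | cons p rest ih =>
    by_cases hp : p = M
    · subst hp
      rw [timeBuild_head]
      simp only [S_cons]
      rw [ih]; ring
    · simp [timeBuild, hp]

lemma timeBuild_mem (M k : Int) (s : List Int) (hle : ∀ q ∈ s, q ≤ M)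
    (hpw : s.Pairwise (fun a b => b ≤ a)) :
    ∀ q ∈ (timeBuild M k s).1, q = M - k ∨ q = k ∨ q < M := by
  induction s with
  | nil => simp [timeBuild]
  | cons p rest ih =>
    by_cases hp : p = M
    · subst hp
      rw [timeBuild_head]
      intro q hq
      rw [List.mem_cons, List.mem_cons] at hq
      rcases hq with h | h | h
      · left; exact h
      · right; left; exact h
      · exact ih (fun q hq => hle q (List.mem_cons_of_mem _ hq)) hpw.of_cons q h
    · intro q hq
      simp only [timeBuild, if_pos hp] at hq
      right; right
      have hpM : p < M := lt_of_le_of_ne (hle p List.mem_cons_self) hp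
      rcases List.mem_cons.mp hq with rfl | hq'
      · exact hpM
      · exact lt_of_le_of_lt ((List.pairwise_cons.mp hpw).1 q hq') hpM

-- sorted-descending-list facts
lemma sdesc_perm (ps : List Int) :
    ((PySem.List.sorted ps (fun x => x) false).reverse).Perm ps :=
  (List.reverse_perm _).trans (PySem.List.sorted_perm ps (fun x => x) false)

lemma sdesc_pairwise (ps : List Int) :
    ((PySem.List.sorted ps (fun x => x) false).reverse).Pairwise (fun a b => b ≤ a) := by
  rw [List.pairwise_reverse]
  exact PySem.List.sorted_pairwise ps (fun x => x)

lemma sdesc_facts (ps : List Int) (h : Int) (t : List Int)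
    (hs : (PySem.List.sorted ps (fun x => x) false).reverse = h :: t) :
    (∀ y ∈ ps, y ≤ h) ∧ PySem.List.max? ps (fun x => x) = some h := by
  have hperm : (h :: t).Perm ps := hs ▸ sdesc_perm ps
  have hpw : (h :: t).Pairwise (fun a b => b ≤ a) := hs ▸ sdesc_pairwise ps
  have hall : ∀ y ∈ ps, y ≤ h := by
    intro y hy
    rcases List.mem_cons.mp (hperm.mem_iff.mpr hy) with rfl | hy'
    · exact le_refl y
    · exact (List.pairwise_cons.mp hpw).1 y hy'
  refine ⟨hall, ?_⟩
  cases hm : PySem.List.max? ps (fun x => x) with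
  | none =>
    have : ps = [] := (PySem.List.max?_eq_none_iff ps _).mp hm
    subst this
    exact absurd hperm.symm (by simp)
  | some m =>
    have hm1 : m ∈ ps := PySem.List.max?_mem hm
    have hm2 : ∀ y ∈ ps, y ≤ m := PySem.List.max?_isMax hm
    have hh : h ∈ ps := hperm.mem_iff.mp List.mem_cons_self
    rw [le_antisymm (hm2 h hh) (hall m hm1)]

-- loop lemmas
lemma loop_le_init (n : Nat) (s : List Int) (M : Int) (ks : List Int) (r : Int) :
    timeLoopF n s M ks r ≤ r := by
  induction ks generalizing r with
  | nil => simp [timeLoopF]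
  | cons k ks ih =>
    simp only [timeLoopF]
    split_ifs with h
    · exact le_refl r
    · exact le_trans (ih _) (min_le_right _ _)

lemma loop_ge (n : Nat) (s : List Int) (M B : Int) (ks : List Int) :
    ∀ r : Int, B ≤ r →
    (∀ k ∈ ks, ¬ k > M - k → B ≤ (timeBuild M k s).2 + timeF n (timeBuild M k s).1) →
    B ≤ timeLoopF n s M ks r := by
  induction ks with
  | nil => intro r hr _; simpa [timeLoopF]
  | cons k ks ih =>
    intro r hr h
    simp only [timeLoopF]
    split_ifs with hb
    · exact hr
    · exact ih _ (le_min (h k List.mem_cons_self hb) hr)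
        (fun k' hk' hb' => h k' (List.mem_cons_of_mem _ hk') hb')

lemma loop_le_visited (n : Nat) (s : List Int) (M k : Int) (ks : List Int) :
    ks.Pairwise (· < ·) → k ∈ ks → 2 * k ≤ M → ∀ r : Int,
    timeLoopF n s M ks r ≤ (timeBuild M k s).2 + timeF n (timeBuild M k s).1 := by
  induction ks with
  | nil => intro _ hk; simp at hk
  | cons a ks ih =>
    intro hpw hk h2 r
    rw [List.pairwise_cons] at hpw
    rcases List.mem_cons.mp hk with rfl | hk'
    · simp only [timeLoopF, if_neg (by omega : ¬ k > M - k)]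
      exact le_trans (loop_le_init _ _ _ _ _) (min_le_left _ _)
    · have ha : a < k := hpw.1 k hk'
      simp only [timeLoopF, if_neg (by omega : ¬ a > M - a)]
      exact ih hpw.2 hk' h2 _

-- generic foldl-min lemmas
lemma foldmin_le_init (g : Int → Int) (ks : List Int) (r : Int) :
    ks.foldl (fun b d => min b (g d)) r ≤ r := by
  induction ks generalizing r with
  | nil => simp
  | cons k ks ih => exact le_trans (ih _) (min_le_left _ _)

lemma foldmin_le_mem (g : Int → Int) (ks : List Int) (d : Int) :
    d ∈ ks → ∀ r : Int, ks.foldl (fun b d => min b (g d)) r ≤ g d := by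
  induction ks with
  | nil => intro hd; simp at hd
  | cons k ks ih =>
    intro hd r
    simp only [List.foldl_cons]
    rcases List.mem_cons.mp hd with h | hd'
    · subst h
      exact le_trans (foldmin_le_init _ _ _) (min_le_right _ _)
    · exact ih hd' _

lemma foldmin_ge (g : Int → Int) (B : Int) (ks : List Int) :
    ∀ r : Int, B ≤ r → (∀ d ∈ ks, B ≤ g d) →
    B ≤ ks.foldl (fun b d => min b (g d)) r := by
  induction ks with
  | nil => intro r hr _; simpa
  | cons k ks ih =>
    intro r hr h
    exact ih _ (le_min hr (h k List.mem_cons_self))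
      (fun d hd => h d (List.mem_cons_of_mem _ hd))

lemma foldmin_attained (g : Int → Int) (ks : List Int) (r : Int) :
    ks.foldl (fun b d => min b (g d)) r = r ∨
      ∃ d ∈ ks, ks.foldl (fun b d => min b (g d)) r = g d := by
  induction ks generalizing r with
  | nil => left; rfl
  | cons k ks ih =>
    simp only [List.foldl_cons]
    rcases ih (min r (g k)) with h | ⟨d, hd, h⟩
    · rcases min_choice r (g k) with hm | hm
      · left; rw [h, hm]
      · right; exact ⟨k, List.mem_cons_self, by rw [h, hm]⟩
    · right; exact ⟨d, List.mem_cons_of_mem _ hd, h⟩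

-- time_alt characterisation
lemma time_alt_pos (ps : List Int) (m : Int)
    (hm : PySem.List.max? ps (fun x => x) = some m) (hpos : 0 < m) :
    time_alt ps = (PySem.List.pyRange 1 m 1).foldl (fun b d => min b (costB ps d)) m := by
  unfold time_alt
  rw [hm]
  simp [not_le.mpr hpos]

lemma costB_top (ps : List Int) (m : Int) (hpos : 0 < m) (hall : ∀ p ∈ ps, p ≤ m) :
    costB ps m = m := by
  rw [costB_eq, S_top m ps hpos hall]; ring

lemma time_alt_le_cost (ps : List Int) (m d : Int)
    (hm : PySem.List.max? ps (fun x => x) = some m) (hpos : 0 < m)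
    (hd1 : 1 ≤ d) (hdm : d ≤ m) :
    time_alt ps ≤ costB ps d := by
  rw [time_alt_pos ps m hm hpos]
  rcases eq_or_lt_of_le hdm with rfl | hlt
  · rw [costB_top ps d hpos (PySem.List.max?_isMax hm)]
    exact foldmin_le_init _ _ _
  · exact foldmin_le_mem _ _ _ (PySem.List.mem_pyRange_one.mpr ⟨hd1, hlt⟩) _

lemma time_alt_attained (ps : List Int) (m : Int)
    (hm : PySem.List.max? ps (fun x => x) = some m) (hpos : 0 < m) :
    ∃ d, 1 ≤ d ∧ d ≤ m ∧ time_alt ps = costB ps d := by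
  rw [time_alt_pos ps m hm hpos]
  rcases foldmin_attained (costB ps) (PySem.List.pyRange 1 m 1) m with h | ⟨d, hd, h⟩
  · exact ⟨m, hpos, le_refl m, by rw [h, costB_top ps m hpos (PySem.List.max?_isMax hm)]⟩
  · have hmem := PySem.List.mem_pyRange_one.mp hd
    exact ⟨d, hmem.1, le_of_lt hmem.2, h⟩

-- the split cost inequalities
lemma cost_split_ge (ps s : List Int) (d M k : Int) (hperm : s.Perm ps)
    (hd : 0 < d) (hk : 1 ≤ k) (hkM : 2 * k ≤ M) :
    costB ps d ≤ (timeBuild M k s).2 + costB (timeBuild M k s).1 d := by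
  have hc := timeBuild_snd_nonneg M k s
  have hsuper := ct_superadd d M k hd (by omega) (by omega)
  have hMk : term d (M - k) = ct d (M - k) - 1 := if_pos (by omega : (0:Int) < M - k)
  have hkk : term d k = ct d k - 1 := if_pos (by omega : (0:Int) < k)
  have hMM : term d M = ct d M - 1 := if_pos (by omega : (0:Int) < M)
  rw [costB_eq, costB_eq, timeBuild_S, S_perm d hperm, hMk, hkk, hMM]
  nlinarith [hc, hsuper]

lemma cost_split_le (ps s : List Int) (d M : Int) (hperm : s.Perm ps)
    (hd : 0 < d) (hdM : d < M) :
    (timeBuild M (if 2 * d ≤ M then d else M - d) s).2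
      + costB (timeBuild M (if 2 * d ≤ M then d else M - d) s).1 d ≤ costB ps d := by
  set k : Int := if 2 * d ≤ M then d else M - d with hkdef
  have hdelta : term d (M - k) + term d k - term d M = -1 := by
    by_cases hcase : 2 * d ≤ M
    · have hk : k = d := by rw [hkdef, if_pos hcase]
      rw [hk]
      have h1 : term d (M - d) = ct d M - 2 := by
        rw [term, if_pos (by omega : (0:Int) < M - d), ct_sub d M hd]; ring
      have h2 : term d d = 0 := by
        rw [term, if_pos hd, ct_one d d hd hd (le_refl d)]; ring
      have h3 : term d M = ct d M - 1 := if_pos (by omega : (0:Int) < M)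
      rw [h1, h2, h3]; ring
    · have hk : k = M - d := by rw [hkdef, if_neg hcase]
      rw [hk]
      have hMd : M - (M - d) = d := by ring
      rw [hMd]
      have h1 : term d d = 0 := by
        rw [term, if_pos hd, ct_one d d hd hd (le_refl d)]; ring
      have h2 : term d (M - d) = 0 := by
        rw [term, if_pos (by omega : (0:Int) < M - d),
          ct_one d (M - d) hd (by omega) (by omega)]; ring
      have h3 : term d M = 1 := by
        rw [term, if_pos (by omega : (0:Int) < M), ct_two d M hd hdM (by omega)]
        norm_num
      rw [h1, h2, h3]; ring
  have hc := timeBuild_snd_nonneg M k s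
  rw [costB_eq, costB_eq, timeBuild_S, S_perm d hperm, hdelta]
  linarith

-- the main induction: A's recursion computes B's minimum
lemma timeF_eq : ∀ (n : Nat) (ps : List Int), ps ≠ [] → 0 < n →
    (∀ p ∈ ps, p < (n : Int)) → timeF n ps = time_alt ps := by
  intro n
  induction n with
  | zero => intro ps _ h0 _; exact absurd h0 (lt_irrefl 0)
  | succ n ih =>
    intro ps hne _ hbound
    obtain ⟨h, t, hs⟩ : ∃ h t, (PySem.List.sorted ps (fun x => x) false).reverse = h :: t := by
      cases hcase : (PySem.List.sorted ps (fun x => x) false).reverse with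
      | nil =>
        rw [List.reverse_eq_nil_iff, PySem.List.sorted_eq_nil_iff] at hcase
        exact absurd hcase hne
      | cons a l => exact ⟨a, l, rfl⟩
    obtain ⟨hall, hmax⟩ := sdesc_facts ps h t hs
    have hstep : timeF (n + 1) ps = timeStep n (h :: t) := by
      rw [timeF, hs]
    have hperm : (h :: t).Perm ps := hs ▸ sdesc_perm ps
    have hpw : (h :: t).Pairwise (fun a b => b ≤ a) := hs ▸ sdesc_pairwise ps
    have hhps : h ∈ ps := hperm.mem_iff.mp List.mem_cons_self
    by_cases hh0 : h ≤ 0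
    · -- all piles nonpositive: the k-loop range is empty on both sides
      rw [hstep]
      simp only [timeStep, if_neg (by omega : ¬ h = 1)]
      rw [PySem.List.pyRange_one_eq_nil (by omega : h - 1 ≤ 1)]
      unfold time_alt
      rw [hmax]
      simp [timeLoopF, hh0]
    · by_cases hh1 : h = 1
      · subst hh1
        rw [hstep]
        unfold time_alt
        rw [hmax]
        simp [timeStep, PySem.List.pyRange_one_eq_nil (le_refl (1:Int))]
      · -- main case: h ≥ 2
        have hh2 : 2 ≤ h := by omega
        have hhn : (h : Int) ≤ (n : Int) := by
          have := hbound h hhps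
          push_cast at this ⊢
          omega
        have hn2 : (2:Int) ≤ (n : Int) := le_trans hh2 hhn
        have hn0 : 0 < n := by exact_mod_cast lt_of_lt_of_le (by norm_num : (0:Int) < 2) hn2
        have halls : ∀ q ∈ h :: t, q ≤ h := fun q hq => hall q (hperm.mem_iff.mp hq)
        -- facts about a recursive call at a legal split size k
        have key : ∀ k : Int, 1 ≤ k → 2 * k ≤ h →
            timeF n (timeBuild h k (h :: t)).1 = time_alt (timeBuild h k (h :: t)).1 ∧
            ∃ m', PySem.List.max? (timeBuild h k (h :: t)).1 (fun x => x) = some m' ∧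
              h - k ≤ m' ∧ m' ≤ h - 1 := by
          intro k hk1 hk2
          have hhead := timeBuild_head h k t
          have hne' : (timeBuild h k (h :: t)).1 ≠ [] := by rw [hhead]; simp
          have hmem' : h - k ∈ (timeBuild h k (h :: t)).1 := by rw [hhead]; exact List.mem_cons_self
          have hbnd : ∀ q ∈ (timeBuild h k (h :: t)).1, q ≤ h - 1 := by
            intro q hq
            rcases timeBuild_mem h k (h :: t) halls hpw q hq with rfl | rfl | hlt <;> omega
          obtain ⟨m', hm'⟩ : ∃ m', PySem.List.max? (timeBuild h k (h :: t)).1 (fun x => x) = some m' := by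
            cases hcase : PySem.List.max? (timeBuild h k (h :: t)).1 (fun x => x) with
            | none => exact absurd ((PySem.List.max?_eq_none_iff _ _).mp hcase) hne'
            | some m' => exact ⟨m', rfl⟩
          have hm'le : m' ≤ h - 1 := hbnd m' (PySem.List.max?_mem hm')
          have hm'ge : h - k ≤ m' := PySem.List.max?_isMax hm' _ hmem'
          refine ⟨ih _ hne' hn0 ?_, m', hm', hm'ge, hm'le⟩
          intro q hq
          have := hbnd q hq
          omega
        rw [hstep]
        simp only [timeStep, if_neg hh1]
        apply le_antisymm
        · -- A ≤ B : every candidate cost d is ≥ the loop's value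
          rw [time_alt_pos ps h hmax (by omega)]
          apply foldmin_ge _ _ _ _ (loop_le_init _ _ _ _ _)
          intro d hd
          have hdr := PySem.List.mem_pyRange_one.mp hd
          by_cases hh2' : h = 2
          · -- only d = 1; the loop is empty and returns h = 2, and cost 1 ≥ 2
            have hd1 : d = 1 := by omega
            subst hd1
            have hterm : term 1 h = h - 1 := by
              rw [term, if_pos (by omega : (0:Int) < h)]
              have : ct 1 h = h := by
                unfold ct
                rw [PySem.Int.floordiv_eq_iff_of_pos (by norm_num : (0:Int) < 1)]
                omega
              omega
            have hS : h - 1 ≤ S 1 ps := hterm ▸ S_ge_term 1 h ps (by norm_num) hhps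
            have : (2:Int) ≤ costB ps 1 := by
              rw [costB_eq]; omega
            exact le_trans (le_trans (loop_le_init _ _ _ _ _) (by omega)) this
          · -- h ≥ 3: split size k* = d or h - d is visited by the loop
            have hh3 : 3 ≤ h := by omega
            set kst : Int := if 2 * d ≤ h then d else h - d with hkst
            have hk1 : 1 ≤ kst := by rw [hkst]; split_ifs <;> omega
            have hk2 : 2 * kst ≤ h := by rw [hkst]; split_ifs <;> omega
            have hkr : kst < h - 1 := by rw [hkst]; split_ifs <;> omega
            have hv := loop_le_visited n (h :: t) h kst (PySem.List.pyRange 1 (h - 1) 1)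
              (PySem.List.pairwise_lt_pyRange_one 1 (h - 1))
              (PySem.List.mem_pyRange_one.mpr ⟨hk1, hkr⟩) hk2 h
            obtain ⟨hihk, m', hm', hm'ge, hm'le⟩ := key kst hk1 hk2
            have hdm' : d ≤ m' := by
              have : d ≤ h - kst := by rw [hkst]; split_ifs <;> omega
              omega
            have hchain : time_alt (timeBuild h kst (h :: t)).1 ≤ costB (timeBuild h kst (h :: t)).1 d :=
              time_alt_le_cost _ m' d hm' (by omega) hdr.1 hdm'
            have hsplit := cost_split_le ps (h :: t) d h hperm (by omega) hdr.2
            rw [← hkst] at hsplit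
            calc timeLoopF n (h :: t) h (PySem.List.pyRange 1 (h - 1) 1) h
                ≤ (timeBuild h kst (h :: t)).2 + timeF n (timeBuild h kst (h :: t)).1 := hv
              _ = (timeBuild h kst (h :: t)).2 + time_alt (timeBuild h kst (h :: t)).1 := by rw [hihk]
              _ ≤ (timeBuild h kst (h :: t)).2 + costB (timeBuild h kst (h :: t)).1 d := by omega
              _ ≤ costB ps d := hsplit
        · -- B ≤ A : the loop's initial value and every visited candidate are ≥ B's minimum
          apply loop_ge
          · rw [← costB_top ps h (by omega) hall]
            exact time_alt_le_cost ps h h hmax (by omega) (by omega) (le_refl h)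
          · intro k hk hbrk
            have hkr := PySem.List.mem_pyRange_one.mp hk
            have hk2 : 2 * k ≤ h := by omega
            obtain ⟨hihk, m', hm', hm'ge, hm'le⟩ := key k hkr.1 hk2
            obtain ⟨dstar, hd1, hd2, hdeq⟩ := time_alt_attained _ m' hm' (by omega)
            have hchain : time_alt ps ≤ costB ps dstar :=
              time_alt_le_cost ps h dstar hmax (by omega) hd1 (by omega)
            have hsplit := cost_split_ge ps (h :: t) dstar h k hperm (by omega) hkr.1 hk2
            rw [hihk, hdeq]
            omega

lemma time_eq (ps : List Int) (h : ps ≠ []) : time ps = time_alt ps := by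
  have hF := (PySem.List.le_foldl_max ps 0).2
  have h0 : (0:Int) ≤ ps.foldl max 0 := (PySem.List.le_foldl_max ps 0).1
  apply timeF_eq _ _ h
  · exact Nat.succ_pos _
  · intro p hp
    have hp' := hF p hp
    unfold fuelTime
    push_cast
    rw [Int.toNat_of_nonneg h0]
    omega

-- ===== VERDICT (by name: the statement is the Claim_ definition above) =====
theorem time_spec : Claim_equal_time := by
  intro ps _ hpre
  unfold Spec_time
  exact time_eq ps hpre
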